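-- pv_equiv track=rewrite | github.com/DmitryChitalov/algorithms_2022 | task5_2.py | operation_add
-- ===== SOURCE A (Python) =====
-- from collections import defaultdict
--
-- def lst_to_ddict(num):
--     hex_to_dec = {'0': 0, '1': 1, '2': 2, '3': 3, '4': 4, '5': 5, '6': 6, '7': 7,
--                   '8': 8, '9': 9, 'A': 10, 'B': 11, 'C': 12, 'D': 13, 'E': 14, 'F': 15}
--
--     return defaultdict(int, {index: hex_to_dec[value] for index, value in enumerate(reversed(num))})
--
-- def ddict_to_lst(num):
--     hex_to_dec = {'0': 0, '1': 1, '2': 2, '3': 3, '4': 4, '5': 5, '6': 6, '7': 7,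
--                   '8': 8, '9': 9, 'A': 10, 'B': 11, 'C': 12, 'D': 13, 'E': 14, 'F': 15}
--     dec_to_hex = {val: key for key, val in hex_to_dec.items()}
--
--     return [dec_to_hex[num[i]] for i in reversed(num)]
--
-- def operation_add(a, b):
--     a = lst_to_ddict(a)
--     b = lst_to_ddict(b)
--     c = defaultdict(int)
--     next_num = 0
--     n = max(len(a), len(b))
--     for i in range(n):
--         c[i] = (a[i] + b[i] + next_num) % 16
--         next_num = (a[i] + b[i] + next_num) // 16
--     if next_num > 0:
--         c[n] = next_num
--     return ddict_to_lst(c)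
-- ===== SOURCE B (Python) =====
-- def operation_add(a, b):
--     hex_to_dec = {'0': 0, '1': 1, '2': 2, '3': 3, '4': 4, '5': 5, '6': 6, '7': 7,
--                   '8': 8, '9': 9, 'A': 10, 'B': 11, 'C': 12, 'D': 13, 'E': 14, 'F': 15}
--     dec_to_hex = ['0', '1', '2', '3', '4', '5', '6', '7',
--                   '8', '9', 'A', 'B', 'C', 'D', 'E', 'F']
--     va = 0
--     for ch in a:
--         va = va * 16 + hex_to_dec[ch]
--     vb = 0
--     for ch in b:
--         vb = vb * 16 + hex_to_dec[ch]
--     s = va + vb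
--     width = max(len(a), len(b))
--     count = width + 1 if s >= 16 ** width else width
--     return [dec_to_hex[(s // 16 ** i) % 16] for i in range(count)][::-1]
-- ===== Notes on version B (the rewrite author's own statement) =====
-- stated objective: alternative
-- what changed: Replaces A's defaultdict digit tables and carry-propagating loop by converting both lists to a single big integer, adding, and extracting the output digits with division/modulus in closed form ((s // 16**i) % 16).
import Mathlib
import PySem

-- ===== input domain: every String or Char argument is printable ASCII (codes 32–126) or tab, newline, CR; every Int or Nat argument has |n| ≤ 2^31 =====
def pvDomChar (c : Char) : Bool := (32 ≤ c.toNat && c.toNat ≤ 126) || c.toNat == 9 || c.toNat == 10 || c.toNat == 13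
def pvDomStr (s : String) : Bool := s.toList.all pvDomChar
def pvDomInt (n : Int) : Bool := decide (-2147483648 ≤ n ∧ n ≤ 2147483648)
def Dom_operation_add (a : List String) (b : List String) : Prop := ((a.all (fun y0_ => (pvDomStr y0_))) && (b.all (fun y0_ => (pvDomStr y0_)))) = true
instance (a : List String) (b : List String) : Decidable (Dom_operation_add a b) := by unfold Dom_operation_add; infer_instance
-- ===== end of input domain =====

-- B replaces A's defaultdict digit tables and carry loop by one big-integer addition
-- followed by closed-form digit extraction ((s // 16**i) % 16); alternative algorithm, not claimed faster.


-- ===== PORT A =====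
-- hex_to_dec literal of A
def pvHexToDecA : PySem.Dict String Int := PySem.Dict.ofList
  [("0",0),("1",1),("2",2),("3",3),("4",4),("5",5),("6",6),("7",7),
   ("8",8),("9",9),("A",10),("B",11),("C",12),("D",13),("E",14),("F",15)]

-- dec_to_hex = {val: key for key, val in hex_to_dec.items()}
def pvDecToHexA : PySem.Dict Int String := PySem.Dict.ofList
  [(0,"0"),(1,"1"),(2,"2"),(3,"3"),(4,"4"),(5,"5"),(6,"6"),(7,"7"),
   (8,"8"),(9,"9"),(10,"A"),(11,"B"),(12,"C"),(13,"D"),(14,"E"),(15,"F")]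

-- defaultdict(int, {index: hex_to_dec[value] for index, value in enumerate(reversed(num))})
-- hex_to_dec[value] raises KeyError on a non-hex string; those inputs are outside Pre_, here getD 0.
def lst_to_ddict (num : List String) : PySem.Dict Int Int :=
  (PySem.List.enumerate num.reverse).foldl
    (fun d p => d.insert p.1 (pvHexToDecA.getD p.2 0)) PySem.Dict.empty

-- [dec_to_hex[num[i]] for i in reversed(num)]  (reversed(dict) iterates keys in reverse order;
-- num is a defaultdict(int), so num[i] is getD 0; dec_to_hex[…] total here as values stay in 0..15)
def ddict_to_lst (num : PySem.Dict Int Int) : List String :=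
  num.keys.reverse.map (fun i => pvDecToHexA.getD (num.getD i 0) "")

def operation_add (a : List String) (b : List String) : List String :=
  let ad := lst_to_ddict a
  let bd := lst_to_ddict b
  let n : Nat := max ad.size bd.size
  let st := (PySem.List.pyRange 0 (n : Int) 1).foldl
    (fun (st : PySem.Dict Int Int × Int) i =>
      (st.1.insert i (PySem.Int.mod (ad.getD i 0 + bd.getD i 0 + st.2) 16),
       PySem.Int.floordiv (ad.getD i 0 + bd.getD i 0 + st.2) 16))
    (PySem.Dict.empty, 0)
  let c := if st.2 > 0 then st.1.insert (n : Int) st.2 else st.1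
  ddict_to_lst c

-- ===== PORT B =====
def pvHexToDecB : PySem.Dict String Int := PySem.Dict.ofList
  [("0",0),("1",1),("2",2),("3",3),("4",4),("5",5),("6",6),("7",7),
   ("8",8),("9",9),("A",10),("B",11),("C",12),("D",13),("E",14),("F",15)]

def pvDecToHexB : List String :=
  ["0","1","2","3","4","5","6","7","8","9","A","B","C","D","E","F"]

-- hex_to_dec[ch] raises KeyError on a non-hex string; those inputs are outside Pre_, here getD 0.
-- i.toNat is exact: i ranges over range(count), so 0 ≤ i.  [::-1] is .reverse.
def operation_add_alt (a : List String) (b : List String) : List String :=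
  let va := a.foldl (fun v ch => v * 16 + pvHexToDecB.getD ch 0) 0
  let vb := b.foldl (fun v ch => v * 16 + pvHexToDecB.getD ch 0) 0
  let s := va + vb
  let width : Nat := max a.length b.length
  let count : Nat := if s ≥ 16 ^ width then width + 1 else width
  ((PySem.List.pyRange 0 (count : Int) 1).map
    (fun i => PySem.List.pyGetD pvDecToHexB
      (PySem.Int.mod (PySem.Int.floordiv s (16 ^ i.toNat)) 16) "")).reverse

-- ===== PRECONDITION & SPEC =====
def pvHexStrings : List String :=
  ["0","1","2","3","4","5","6","7","8","9","A","B","C","D","E","F"]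

-- Pre_ excludes exactly the inputs on which A raises KeyError: some element is not a single
-- uppercase hexadecimal digit character.
def Pre_operation_add (a : List String) (b : List String) : Prop :=
  (∀ x ∈ a, x ∈ pvHexStrings) ∧ (∀ x ∈ b, x ∈ pvHexStrings)
instance (a : List String) (b : List String) : Decidable (Pre_operation_add a b) := by
  unfold Pre_operation_add; infer_instance

def pvWitness_operation_add : List String × List String := (["A","7"], ["F"])

def Spec_operation_add (a : List String) (b : List String) (out : List String) : Prop := out = operation_add_alt a b
instance (a : List String) (b : List String) (out : List String) : Decidable (Spec_operation_add a b out) := by unfold Spec_operation_add; infer_instance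

-- ===== CLAIM (what is proved, stated in full; the proofs are below) =====
def Claim_equal_operation_add : Prop := ∀ (a : List String) (b : List String), Dom_operation_add a b → Pre_operation_add a b → Spec_operation_add a b (operation_add a b)

-- ===== LEMMAS AND PROOFS =====

-- digit value of one hex string, and the little-endian digit list of a hex list
def pvHd (ch : String) : Int := pvHexToDecA.getD ch 0
def pvDs (l : List String) : List Int := l.reverse.map pvHd
-- value of a little-endian digit list
def pvVal (ds : List Int) : Int := ∑ i ∈ Finset.range ds.length, ds.getD i 0 * 16 ^ i
-- partial sums of (digit of a + digit of b) * 16^i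
def pvT (g : Nat → Int) (k : Nat) : Int := ∑ i ∈ Finset.range k, g i * 16 ^ i
-- the i-th base-16 digit of s
def pvDigit (s : Int) (i : Nat) : Int := s / 16 ^ i % 16
-- the sum of the two inputs, and the number of output digits
def pvS (a b : List String) : Int := pvVal (pvDs a) + pvVal (pvDs b)
def pvCount (a b : List String) : Nat :=
  if 16 ^ max a.length b.length ≤ pvS a b then max a.length b.length + 1
  else max a.length b.length

lemma pvHdB (ch : String) : pvHexToDecB.getD ch 0 = pvHd ch := rfl

lemma pvNodupCastRange (n : Nat) : ((List.range n).map (fun i : Nat => (i : Int))).Nodup := by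
  refine List.Nodup.map ?_ List.nodup_range
  intro x y h; exact Nat.cast_injective h

lemma pvItems_lst (l : List String) :
    (lst_to_ddict l).items
      = (PySem.List.enumerate l.reverse).map (fun p => (p.1, pvHexToDecA.getD p.2 0)) := by
  unfold lst_to_ddict
  rw [PySem.Dict.items_foldl_insert_fresh (PySem.List.enumerate l.reverse)
        (fun p => p.1) (fun p => pvHexToDecA.getD p.2 0) (PySem.Dict.empty : PySem.Dict Int Int)
        (by intro p _; simp [PySem.Dict.contains_empty])
        (by rw [PySem.List.map_fst_enumerate]
            simp only [zero_add]
            rw [PySem.List.pyRange_zero_natCast]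
            exact pvNodupCastRange _)]
  rfl

lemma pvKeys_lst (l : List String) :
    (lst_to_ddict l).keys = (List.range l.length).map (fun i : Nat => (i : Int)) := by
  show (lst_to_ddict l).items.map (fun p => p.1) = _
  rw [pvItems_lst, List.map_map]
  have : ((fun p : Int × Int => p.1) ∘ fun p : Int × String => (p.1, pvHexToDecA.getD p.2 0))
      = fun p : Int × String => p.1 := rfl
  rw [this, PySem.List.map_fst_enumerate]
  simp only [zero_add, List.length_reverse]
  exact PySem.List.pyRange_zero_natCast _

lemma pvNodupKeys_lst (l : List String) : (lst_to_ddict l).keys.Nodup := by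
  rw [pvKeys_lst]; exact pvNodupCastRange _

lemma pvSize_lst (l : List String) : (lst_to_ddict l).size = l.length := by
  show (lst_to_ddict l).items.length = _
  rw [pvItems_lst]
  simp [PySem.List.length_enumerate]

lemma pvGetD_lst (l : List String) (i : Nat) :
    (lst_to_ddict l).getD (i : Int) 0 = (pvDs l).getD i 0 := by
  by_cases h : i < l.length
  · have hrev : i < l.reverse.length := by simpa using h
    have hmem : ((i : Int), pvHexToDecA.getD (l.reverse[i]) 0) ∈ (lst_to_ddict l).items := by
      rw [pvItems_lst]
      have : ((i : Int), l.reverse[i]) ∈ PySem.List.enumerate l.reverse := by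
        rw [PySem.List.mem_enumerate_iff]
        exact ⟨i, hrev, by simp⟩
      exact List.mem_map_of_mem this
    rw [PySem.Dict.getD_of_mem_items _ hmem (pvNodupKeys_lst l)]
    have hm : i < (pvDs l).length := by simp [pvDs]; omega
    rw [List.getD_eq_getElem _ _ hm]
    simp [pvDs, pvHd]
  · rw [PySem.Dict.getD_of_not_contains]
    · symm; apply List.getD_eq_default; simp [pvDs]; omega
    · rw [PySem.Dict.contains_eq_decide_mem_keys, pvKeys_lst]
      simp; omega

lemma pvHdBound (x : String) (hx : x ∈ pvHexStrings) : 0 ≤ pvHd x ∧ pvHd x < 16 := by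
  simp only [pvHexStrings, List.mem_cons, List.not_mem_nil, or_false] at hx
  rcases hx with rfl|rfl|rfl|rfl|rfl|rfl|rfl|rfl|rfl|rfl|rfl|rfl|rfl|rfl|rfl|rfl <;> decide

lemma pvBounds (l : List String) (hl : ∀ x ∈ l, x ∈ pvHexStrings) (i : Nat) :
    0 ≤ (pvDs l).getD i 0 ∧ (pvDs l).getD i 0 < 16 := by
  by_cases h : i < (pvDs l).length
  · rw [List.getD_eq_getElem _ _ h]
    have h2 : i < l.reverse.length := by simpa [pvDs] using h
    have hval : (pvDs l)[i] = pvHd (l.reverse[i]) := by simp [pvDs]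
    rw [hval]
    exact pvHdBound _ (hl _ (List.mem_reverse.mp (List.getElem_mem h2)))
  · rw [List.getD_eq_default _ _ (by omega)]
    exact ⟨le_refl 0, by norm_num⟩

lemma pvVal_snoc (ds : List Int) (x : Int) :
    pvVal (ds ++ [x]) = pvVal ds + x * 16 ^ ds.length := by
  unfold pvVal
  rw [List.length_append, List.length_singleton, Finset.sum_range_succ]
  congr 1
  · exact Finset.sum_congr rfl (fun i hi => by
      rw [List.getD_append _ _ _ _ (Finset.mem_range.mp hi)])
  · rw [List.getD_append_right _ _ _ _ (le_refl _), Nat.sub_self]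
    rfl

lemma pvHorner (l : List String) : ∀ v : Int,
    l.foldl (fun v ch => v * 16 + pvHexToDecB.getD ch 0) v
      = v * 16 ^ l.length + pvVal (pvDs l) := by
  induction l with
  | nil => intro v; simp [pvVal, pvDs]
  | cons ch t ih =>
    intro v
    rw [List.foldl_cons, ih]
    have hds : pvDs (ch :: t) = pvDs t ++ [pvHd ch] := by simp [pvDs]
    rw [hds, pvVal_snoc, pvHdB]
    have hlen : (pvDs t).length = t.length := by simp [pvDs]
    rw [hlen, List.length_cons]
    ring

lemma pvVal_ext (ds : List Int) (n : Nat) (h : ds.length ≤ n) :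
    ∑ i ∈ Finset.range n, ds.getD i 0 * 16 ^ i = pvVal ds := by
  unfold pvVal
  refine (Finset.sum_subset (by intro x hx; simp only [Finset.mem_range] at hx ⊢; omega) ?_).symm
  intro i _ hi
  rw [List.getD_eq_default _ _ (by simpa using hi)]
  ring

lemma pvT_split (g : Nat → Int) (k n : Nat) (h : k + 1 ≤ n) :
    pvT g n = pvT g (k + 1)
      + 16 ^ (k + 1) * ∑ j ∈ Finset.range (n - (k + 1)), g (k + 1 + j) * 16 ^ j := by
  unfold pvT
  have h2 : ∑ i ∈ Finset.Ico (k + 1) n, g i * 16 ^ i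
      = 16 ^ (k + 1) * ∑ j ∈ Finset.range (n - (k + 1)), g (k + 1 + j) * 16 ^ j := by
    rw [Finset.sum_Ico_eq_sum_range, Finset.mul_sum]
    exact Finset.sum_congr rfl (fun j _ => by rw [pow_add]; ring)
  rw [Finset.range_eq_Ico, ← Finset.sum_Ico_consecutive _ (Nat.zero_le (k + 1)) h, h2,
      ← Finset.range_eq_Ico]

lemma pvT_nonneg (g : Nat → Int) (hg : ∀ i, 0 ≤ g i) (k : Nat) : 0 ≤ pvT g k := by
  unfold pvT
  exact Finset.sum_nonneg (fun i _ => mul_nonneg (hg i) (by positivity))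

lemma pvT_lt (g : Nat → Int) (hg : ∀ i, 0 ≤ g i ∧ g i ≤ 30) (k : Nat) :
    pvT g k < 2 * 16 ^ k := by
  induction k with
  | zero => simp [pvT]
  | succ k ih =>
    have h1 : pvT g (k + 1) = pvT g k + g k * 16 ^ k := by
      unfold pvT; rw [Finset.sum_range_succ]
    have h2 : (16 : Int) ^ (k + 1) = 16 ^ k * 16 := pow_succ _ _
    have h3 : (0 : Int) < 16 ^ k := by positivity
    have h4 := (hg k).2
    rw [h1, h2]
    nlinarith

lemma pvMk_insert (m : Nat) (dS : Nat → Int) (v : Int) :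
    (PySem.Dict.mk ((List.range m).map fun i : Nat => ((i : Int), dS i))).insert (m : Int) v
      = PySem.Dict.mk (((List.range m).map fun i : Nat => ((i : Int), dS i)) ++ [((m : Int), v)]) := by
  apply PySem.Dict.ext
  rw [PySem.Dict.items_insert_of_not_contains]
  rw [PySem.Dict.contains_eq_decide_mem_keys]
  show decide ((m : Int) ∈ (PySem.Dict.mk ((List.range m).map fun i : Nat => ((i : Int), dS i))).items.map (fun p => p.1)) = false
  rw [List.map_map]
  simp only [decide_eq_false_iff_not, List.mem_map, Function.comp]
  rintro ⟨i, hi, hie⟩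
  have : i = m := by exact_mod_cast hie
  simp [List.mem_range] at hi
  omega

lemma pvInv (g : Nat → Int) (n : Nat) (k : Nat) (hk : k ≤ n) :
    (List.range k).foldl
      (fun (st : PySem.Dict Int Int × Int) (i : Nat) =>
        (st.1.insert (i : Int) (PySem.Int.mod (g i + st.2) 16),
         PySem.Int.floordiv (g i + st.2) 16))
      (PySem.Dict.empty, 0)
    = (PySem.Dict.mk ((List.range k).map fun i : Nat => ((i : Int), pvDigit (pvT g n) i)),
       pvT g k / 16 ^ k) := by
  induction k with
  | zero => simp [pvT]; rfl
  | succ k ih =>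
    rw [List.range_succ, List.foldl_append, ih (by omega)]
    simp only [List.foldl_cons, List.foldl_nil]
    have hpow : (0 : Int) < 16 ^ k := by positivity
    have hTk1 : pvT g (k + 1) = pvT g k + g k * 16 ^ k := by
      unfold pvT; rw [Finset.sum_range_succ]
    have hdiv : g k + pvT g k / 16 ^ k = pvT g (k + 1) / 16 ^ k := by
      rw [hTk1, Int.add_mul_ediv_right _ _ (ne_of_gt hpow)]; ring
    have hS : pvT g n = pvT g (k + 1)
        + 16 * (∑ j ∈ Finset.range (n - (k + 1)), g (k + 1 + j) * 16 ^ j) * 16 ^ k := by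
      rw [pvT_split g k n hk]; ring
    have hdig : (g k + pvT g k / 16 ^ k) % 16 = pvDigit (pvT g n) k := by
      rw [hdiv, pvDigit, hS, Int.add_mul_ediv_right _ _ (ne_of_gt hpow),
          Int.add_mul_emod_self_left]
    have hcar : (g k + pvT g k / 16 ^ k) / 16 = pvT g (k + 1) / 16 ^ (k + 1) := by
      rw [hdiv, Int.ediv_ediv_of_nonneg (le_of_lt hpow), ← pow_succ]
    rw [PySem.Int.mod_eq_emod_of_pos (by norm_num), PySem.Int.floordiv_eq_ediv_of_pos (by norm_num)]
    rw [hdig, hcar, pvMk_insert]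
    simp

lemma pvOut (m : Nat) (dS : Nat → Int) :
    ddict_to_lst (PySem.Dict.mk ((List.range m).map fun i : Nat => ((i : Int), dS i)))
      = ((List.range m).map (fun i => pvDecToHexA.getD (dS i) "")).reverse := by
  unfold ddict_to_lst
  have hk : (PySem.Dict.mk ((List.range m).map fun i : Nat => ((i : Int), dS i))).keys
      = (List.range m).map (fun i : Nat => (i : Int)) := by
    show ((List.range m).map fun i : Nat => ((i : Int), dS i)).map (fun p => p.1) = _
    rw [List.map_map]; rfl
  have hnd : (PySem.Dict.mk ((List.range m).map fun i : Nat => ((i : Int), dS i))).keys.Nodup := by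
    rw [hk]; exact pvNodupCastRange _
  rw [hk, List.map_reverse, List.map_map]
  congr 1
  refine List.map_congr_left ?_
  intro i hi
  show pvDecToHexA.getD ((PySem.Dict.mk _).getD (i : Int) 0) "" = _
  rw [PySem.Dict.getD_of_mem_items _ (List.mem_map_of_mem (f := fun i : Nat => ((i : Int), dS i)) hi) hnd]

lemma pvDigit_bounds (s : Int) (i : Nat) : 0 ≤ pvDigit s i ∧ pvDigit s i < 16 :=
  ⟨Int.emod_nonneg _ (by norm_num), Int.emod_lt_of_pos _ (by norm_num)⟩

lemma pvA_eq (a b : List String) (ha : ∀ x ∈ a, x ∈ pvHexStrings)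
    (hb : ∀ x ∈ b, x ∈ pvHexStrings) :
    operation_add a b
      = ((List.range (pvCount a b)).map (fun i => pvDecToHexA.getD (pvDigit (pvS a b) i) "")).reverse := by
  have hga := pvBounds a ha
  have hgb := pvBounds b hb
  set g : Nat → Int := fun i => (pvDs a).getD i 0 + (pvDs b).getD i 0 with hgdef
  have hg0 : ∀ i, 0 ≤ g i := fun i => add_nonneg (hga i).1 (hgb i).1
  have hg30 : ∀ i, 0 ≤ g i ∧ g i ≤ 30 := fun i =>
    ⟨hg0 i, by have := (hga i).2; have := (hgb i).2; simp only [hgdef]; omega⟩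
  set n := max a.length b.length with hn
  have hSn : pvT g n = pvS a b := by
    unfold pvT pvS
    have : ∀ i ∈ Finset.range n, g i * 16 ^ i
        = (pvDs a).getD i 0 * 16 ^ i + (pvDs b).getD i 0 * 16 ^ i := by
      intro i _; simp only [hgdef]; ring
    rw [Finset.sum_congr rfl this, Finset.sum_add_distrib,
        pvVal_ext _ n (by simp [pvDs, hn]), pvVal_ext _ n (by simp [pvDs, hn])]
  have hS0 : 0 ≤ pvS a b := by rw [← hSn]; exact pvT_nonneg g hg0 n
  have hS2 : pvS a b < 2 * 16 ^ n := by rw [← hSn]; exact pvT_lt g hg30 n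
  have hpow : (0 : Int) < 16 ^ n := by positivity
  simp only [operation_add]
  rw [pvSize_lst, pvSize_lst]
  rw [PySem.List.pyRange_zero_natCast, List.foldl_map]
  simp only [pvGetD_lst]
  have hinv := pvInv g n n le_rfl
  simp only [] at hinv
  rw [hinv, hSn]
  by_cases hc : 16 ^ n ≤ pvS a b
  · rw [if_pos (by
      show 0 < pvS a b / 16 ^ n
      rw [Int.lt_iff_add_one_le, zero_add, Int.le_ediv_iff_mul_le hpow, one_mul]
      exact hc)]
    have hcd : pvS a b / 16 ^ n = pvDigit (pvS a b) n := by
      rw [pvDigit]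
      refine (Int.emod_eq_of_lt ?_ ?_).symm
      · exact Int.ediv_nonneg hS0 (le_of_lt hpow)
      · have : pvS a b / 16 ^ n < 2 := by
          rw [Int.ediv_lt_iff_lt_mul hpow]; omega
        omega
    rw [hcd, pvMk_insert]
    have : ((List.range n).map fun i : Nat => ((i : Int), pvDigit (pvS a b) i))
        ++ [((n : Int), pvDigit (pvS a b) n)]
        = (List.range (n + 1)).map fun i : Nat => ((i : Int), pvDigit (pvS a b) i) := by
      simp [List.range_succ]
    rw [this, pvOut]
    have : pvCount a b = n + 1 := by rw [pvCount, if_pos hc]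
    rw [this]
  · rw [if_neg (by
      show ¬ 0 < pvS a b / 16 ^ n
      rw [Int.lt_iff_add_one_le, zero_add, Int.le_ediv_iff_mul_le hpow, one_mul]
      exact hc)]
    rw [pvOut]
    have : pvCount a b = n := by rw [pvCount, if_neg hc]
    rw [this]

lemma pvB_eq (a b : List String) :
    operation_add_alt a b
      = ((List.range (pvCount a b)).map
          (fun i => PySem.List.pyGetD pvDecToHexB (pvDigit (pvS a b) i) "")).reverse := by
  simp only [operation_add_alt]
  rw [pvHorner a 0, pvHorner b 0]
  simp only [zero_mul, zero_add]
  have hs : pvVal (pvDs a) + pvVal (pvDs b) = pvS a b := rfl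
  rw [hs]
  have hcount : (if pvS a b ≥ 16 ^ max a.length b.length
      then max a.length b.length + 1 else max a.length b.length) = pvCount a b := by
    rw [pvCount]
  rw [hcount]
  rw [PySem.List.pyRange_zero_natCast, List.map_map]
  congr 1
  refine List.map_congr_left ?_
  intro k _
  show PySem.List.pyGetD pvDecToHexB
      (PySem.Int.mod (PySem.Int.floordiv (pvS a b) (16 ^ ((k : Int)).toNat)) 16) "" = _
  rw [Int.toNat_natCast,
      PySem.Int.floordiv_eq_ediv_of_pos (by positivity),
      PySem.Int.mod_eq_emod_of_pos (by norm_num)]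
  rfl

lemma pvLut (d : Int) (h0 : 0 ≤ d) (h1 : d < 16) :
    pvDecToHexA.getD d "" = PySem.List.pyGetD pvDecToHexB d "" := by
  interval_cases d <;> decide

lemma pvMain (a b : List String) (hpre : Pre_operation_add a b) :
    operation_add a b = operation_add_alt a b := by
  obtain ⟨ha, hb⟩ := hpre
  rw [pvA_eq a b ha hb, pvB_eq a b]
  congr 1
  refine List.map_congr_left ?_
  intro i _
  exact pvLut _ (pvDigit_bounds (pvS a b) i).1 (pvDigit_bounds (pvS a b) i).2

-- ===== VERDICT (by name: the statement is the Claim_ definition above) =====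
theorem operation_add_spec : Claim_equal_operation_add := by
  intro a b _ hpre
  unfold Spec_operation_add
  exact pvMain a b hpre
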